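-- pv_equiv track=rewrite | github.com/siberianbearofficial/lint-gost-tex | src/lint_gost_tex/rules/spelling.py | _split_hyphenated
-- ===== SOURCE A (Python) =====
-- def _split_hyphenated(word: str, offset: int) -> list[tuple[str, int]]:
--     if "-" not in word:
--         return [(word, offset)]
--     parts: list[tuple[str, int]] = []
--     current = offset
--     for part in word.split("-"):
--         if part:
--             parts.append((part, current))
--         current += len(part) + 1
--     return parts
-- ===== SOURCE B (Python) =====
-- def _split_hyphenated(word: str, offset: int) -> list[tuple[str, int]]:
--     # No-hyphen (including empty) words are returned whole, as in the original.
--     if "-" not in word: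
--         return [(word, offset)]
--     # Single index scan: locate each maximal run of non-hyphen characters
--     # directly and slice it out, instead of splitting on "-" and tracking a
--     # running offset over (possibly empty) parts.
--     res: list[tuple[str, int]] = []
--     i, n = 0, len(word)
--     while i < n:
--         if word[i] == "-":
--             i += 1
--             continue
--         j = i
--         while j < n and word[j] != "-":
--             j += 1
--         res.append((word[i:j], offset + i))
--         i = j
--     return res
-- ===== Notes on version B (the rewrite author's own statement) =====
-- stated objective: alternative
-- what changed: Replaces split('-') plus an accumulator loop over (possibly empty) parts with a direct index scan that slices out each maximal non-hyphen run together with its position.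
import Mathlib
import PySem

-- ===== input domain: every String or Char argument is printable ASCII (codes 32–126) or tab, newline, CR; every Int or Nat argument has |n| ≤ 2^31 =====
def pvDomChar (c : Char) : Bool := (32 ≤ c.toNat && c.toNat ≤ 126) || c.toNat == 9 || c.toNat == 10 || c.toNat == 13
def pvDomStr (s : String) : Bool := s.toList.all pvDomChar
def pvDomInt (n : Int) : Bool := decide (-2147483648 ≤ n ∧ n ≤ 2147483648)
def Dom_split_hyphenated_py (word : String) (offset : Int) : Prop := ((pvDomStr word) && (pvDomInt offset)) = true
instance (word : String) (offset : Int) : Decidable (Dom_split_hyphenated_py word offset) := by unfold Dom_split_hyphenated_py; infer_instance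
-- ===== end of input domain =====

-- B replaces A's split('-')-plus-running-offset accumulator loop by a direct index
-- scan slicing out each maximal non-hyphen run; same values, alternative algorithm.

-- ===== PORT A =====
-- the body of A's `for part in word.split("-")` loop, as a fold step over (parts, current)
def pvStepA (st : List (String × Int) × Int) (part : List Char) : List (String × Int) × Int :=
  ((if part != [] then st.1 ++ [(String.ofList part, st.2)] else st.1),
   st.2 + (part.length : Int) + 1)

def split_hyphenated_py (word : String) (offset : Int) : List (String × Int) :=
  if !(PySem.Str.isIn "-" word) then [(word, offset)]
  else ((PySem.Chars.splitOn word.toList ['-']).foldl pvStepA ([], offset)).1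

-- ===== PORT B =====
-- Source B's outer `while i < n` scan over the remaining characters: the inner
-- `while j < n and word[j] != "-"` run search and the slice `word[i:j]` are
-- rendered as takeWhile/dropWhile on the remaining suffix; `i` carries offset + index.
def pvRuns (cs : List Char) (i : Int) : List (String × Int) :=
  match cs with
  | [] => []
  | c :: rest =>
    if c == '-' then pvRuns rest (i + 1)
    else
      (String.ofList (c :: rest.takeWhile (fun d => d != '-')), i) ::
        pvRuns (rest.dropWhile (fun d => d != '-'))
          (i + ((c :: rest.takeWhile (fun d => d != '-')).length : Int))
termination_by cs.length
decreasing_by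
  · simp
  · simpa using Nat.lt_succ_of_le (rest.length_dropWhile_le _)

def split_hyphenated_py_alt (word : String) (offset : Int) : List (String × Int) :=
  if !(PySem.Str.isIn "-" word) then [(word, offset)]
  else pvRuns word.toList offset

-- ===== PRECONDITION & SPEC =====
def Spec_split_hyphenated_py (word : String) (offset : Int) (out : List (String × Int)) : Prop := out = split_hyphenated_py_alt word offset
instance (word : String) (offset : Int) (out : List (String × Int)) : Decidable (Spec_split_hyphenated_py word offset out) := by unfold Spec_split_hyphenated_py; infer_instance

-- ===== CLAIM (what is proved, stated in full; the proofs are below) =====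
def Claim_equal_split_hyphenated_py : Prop := ∀ (word : String) (offset : Int), Dom_split_hyphenated_py word offset → Spec_split_hyphenated_py word offset (split_hyphenated_py word offset)

-- ===== LEMMAS AND PROOFS =====

-- structural characterisation of splitting on a single '-'
def splitH : List Char → List (List Char)
  | [] => [[]]
  | c :: r =>
    if c == '-' then [] :: splitH r
    else match splitH r with
      | [] => [[c]]
      | p :: ps => (c :: p) :: ps

def mapHead (f : List Char → List Char) : List (List Char) → List (List Char)
  | [] => []
  | p :: ps => f p :: ps

theorem splitH_ne_nil (cs : List Char) : splitH cs ≠ [] := by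
  cases cs with
  | nil => simp [splitH]
  | cons c r =>
    simp only [splitH]
    split
    · simp
    · split <;> simp

theorem go_eq_splitH (fuel : Nat) :
    ∀ (l cur : List Char) (acc : List (List Char)), l.length ≤ fuel →
      PySem.Chars.splitOn.go ['-'] fuel l cur acc =
        acc.reverse ++ mapHead (cur.reverse ++ ·) (splitH l) := by
  induction fuel with
  | zero =>
    intro l cur acc h
    have hl : l = [] := by cases l <;> simp_all
    subst hl
    simp [PySem.Chars.splitOn.go, splitH, mapHead]
  | succ fuel ih =>
    intro l cur acc h
    cases l with
    | nil => simp [PySem.Chars.splitOn.go, splitH, mapHead]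
    | cons c rest =>
      rw [PySem.Chars.splitOn.go]
      have hdrop : List.drop (['-'] : List Char).length (c :: rest) = rest := by simp
      rw [hdrop]
      by_cases hc : c = '-'
      · subst hc
        rw [if_pos (by simp [List.isPrefixOf])]
        simp only [List.length_cons] at h
        rw [ih rest [] (List.reverse cur :: acc) (by omega)]
        obtain ⟨p, ps, hps⟩ : ∃ p ps, splitH rest = p :: ps := by
          rcases h' : splitH rest with _ | ⟨p, ps⟩
          · exact absurd h' (splitH_ne_nil rest)
          · exact ⟨p, ps, rfl⟩
        simp [splitH, hps, mapHead]
      · rw [if_neg (by simp [List.isPrefixOf, Ne.symm hc])]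
        simp only [List.length_cons] at h
        rw [ih rest (c :: cur) acc (by omega)]
        obtain ⟨p, ps, hps⟩ : ∃ p ps, splitH rest = p :: ps := by
          rcases h' : splitH rest with _ | ⟨p, ps⟩
          · exact absurd h' (splitH_ne_nil rest)
          · exact ⟨p, ps, rfl⟩
        have hcb : (c == '-') = false := by simp [hc]
        simp [splitH, hcb, hps, mapHead]

theorem splitOn_eq_splitH (cs : List Char) :
    PySem.Chars.splitOn cs ['-'] = splitH cs := by
  unfold PySem.Chars.splitOn
  rw [go_eq_splitH (cs.length + 1) cs [] [] (by omega)]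
  obtain ⟨p, ps, hps⟩ : ∃ p ps, splitH cs = p :: ps := by
    rcases h' : splitH cs with _ | ⟨p, ps⟩
    · exact absurd h' (splitH_ne_nil cs)
    · exact ⟨p, ps, rfl⟩
  simp [hps, mapHead]

theorem dropWhile_head_hyphen (cs : List Char) :
    ∀ d r, cs.dropWhile (fun x => x != '-') = d :: r → d = '-' := by
  induction cs with
  | nil => intro d r h; simp [List.dropWhile] at h
  | cons c rest ih =>
    intro d r h
    rw [List.dropWhile_cons] at h
    by_cases hc : c = '-'
    · subst hc; simp at h; exact h.1.symm
    · simp [hc] at h; exact ih d r h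

theorem splitH_run (cs : List Char) (c : Char) (rest : List Char)
    (hcs : cs = c :: rest) (hc : c ≠ '-') :
    splitH cs = (c :: rest.takeWhile (fun d => d != '-')) ::
      (match rest.dropWhile (fun d => d != '-') with
        | [] => []
        | _ :: r => splitH r) := by
  subst hcs
  induction rest generalizing c with
  | nil => simp [splitH, hc]
  | cons d rs ih =>
    conv_lhs => rw [splitH]
    rw [if_neg (by simp [hc])]
    by_cases hd : d = '-'
    · subst hd
      simp [splitH]
    · rw [ih d hd]
      have hdb : (d != '-') = true := by simp [hd]
      simp only [List.takeWhile_cons, List.dropWhile_cons, hdb, if_true]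

theorem splitH_run_nil (c : Char) (rest : List Char) (hc : c ≠ '-')
    (hdrop : rest.dropWhile (fun d => d != '-') = []) :
    splitH (c :: rest) = [c :: rest.takeWhile (fun d => d != '-')] := by
  rw [splitH_run (c :: rest) c rest rfl hc, hdrop]

theorem splitH_run_cons (c : Char) (rest r : List Char) (hc : c ≠ '-')
    (hdrop : rest.dropWhile (fun d => d != '-') = '-' :: r) :
    splitH (c :: rest) = (c :: rest.takeWhile (fun d => d != '-')) :: splitH r := by
  rw [splitH_run (c :: rest) c rest rfl hc, hdrop]

theorem splitH_hyphen_cons (r : List Char) : splitH ('-' :: r) = [] :: splitH r := by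
  simp [splitH]

theorem foldl_splitH_eq_pvRuns (cs : List Char) (i : Int) :
    ∀ acc : List (String × Int),
      ((splitH cs).foldl pvStepA (acc, i)).1 = acc ++ pvRuns cs i := by
  fun_induction pvRuns cs i with
  | case1 i => intro acc; simp [splitH, pvStepA]
  | case2 i c rest hc ih =>
    intro acc
    have hc' : c = '-' := by simpa using hc
    subst hc'
    rw [splitH_hyphen_cons, List.foldl_cons,
      show pvStepA (acc, i) [] = (acc, i + 1) from by simp [pvStepA],
      ih acc]
  | case3 i c rest hc ih =>
    intro acc
    have hc' : c ≠ '-' := by simpa using hc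
    have hstep : pvStepA (acc, i) (c :: rest.takeWhile (fun d => d != '-')) =
        (acc ++ [(String.ofList (c :: rest.takeWhile (fun d => d != '-')), i)],
         i + ((c :: rest.takeWhile (fun d => d != '-')).length : Int) + 1) := by
      simp [pvStepA]
    rcases hdrop : rest.dropWhile (fun d => d != '-') with _ | ⟨d, r⟩
    · rw [splitH_run_nil c rest hc' hdrop, List.foldl_cons, hstep]
      simp [pvRuns]
    · have hd : d = '-' := dropWhile_head_hyphen rest d r hdrop
      subst hd
      have key := ih (acc ++ [(String.ofList (c :: rest.takeWhile (fun d => d != '-')), i)])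
      rw [hdrop, splitH_hyphen_cons, List.foldl_cons,
        show pvStepA (acc ++ [(String.ofList (c :: rest.takeWhile (fun d => d != '-')), i)],
            i + ((c :: rest.takeWhile (fun d => d != '-')).length : Int)) [] =
          (acc ++ [(String.ofList (c :: rest.takeWhile (fun d => d != '-')), i)],
            i + ((c :: rest.takeWhile (fun d => d != '-')).length : Int) + 1) from by
          simp [pvStepA]] at key
      rw [splitH_run_cons c rest r hc' hdrop, List.foldl_cons, hstep, key]
      simp

-- ===== VERDICT (by name: the statement is the Claim_ definition above) =====
theorem split_hyphenated_py_spec : Claim_equal_split_hyphenated_py := by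
  intro word offset _
  unfold Spec_split_hyphenated_py split_hyphenated_py split_hyphenated_py_alt
  split_ifs
  · rfl
  · rw [splitOn_eq_splitH, foldl_splitH_eq_pvRuns word.toList offset []]
    simp
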